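-- pv_equiv track=rewrite | github.com/DreamBoatOve/aia_eis | v0/aia_eis_v0/ml/rf/dt_0.py | data_duplicate_checker
-- ===== SOURCE A (Python) =====
-- def data_duplicate_checker(data_list):
--     """
--     Function: 当子树被分配的数据集中含有两个及以上的标签种类，此时要再查看每条数据是否相同
--         标签不同，数据相同：
--             数据标签错误，将这批数据创建在一个叶节点中，标签以多数标签为准
--             返回 False
--         标签不同，数据不同：
--             正常情况，继续分割数据集，创建子树
--             返回 True
--     :param:
--         label_num, int, Number of label type
--         data_list = [
--                         [label1(int), [num,num,num,num,]]
--                         [label1(int), [num,num,num,num,]]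
--                         [label2(int), [num,num,num,num,]]
--                         [label2(int), [num,num,num,num,]]
--                         [label2(int), [num,num,num,num,]]
--                         [label3(int), [num,num,num,num,]]
--                         ...
--                         [label2(int), [num,num,num,num,]]
--                     ]
--     :return:
--     """
--     label_count_dict = {}
--
--     existed_data_set = set()
--     for d in data_list:
--         label = d[0]
--         if label not in label_count_dict.keys():
--             label_count_dict[label] = 1
--         else:
--             label_count_dict[label] += 1
--
--         num_list = d[1]
--         num_tuple = tuple(num_list)
--         if num_tuple not in existed_data_set:
--             existed_data_set.add(num_tuple)
--     # Have duplication: labels are different, but data are the same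
--     if len(existed_data_set) == 1:
--         selected_label = None
--         for k, v in label_count_dict.items():
--             if v == max(label_count_dict.values()):
--                 selected_label = k
--                 break
--         return False, selected_label
--     # No duplication: labels are different, but data are different too.
--     elif len(existed_data_set) > 1:
--         return True, None
-- ===== SOURCE B (Python) =====
-- def data_duplicate_checker(data_list):
--     # Compare every row directly against the first row (no set of tuples needed).
--     first_row = data_list[0][1]
--     if any(d[1] != first_row for d in data_list):
--         return True, None
--     # All rows identical: majority label = first-inserted key of maximal count.
--     counts = {}
--     for label, _ in data_list:
--         counts[label] = counts.get(label, 0) + 1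
--     return False, max(counts, key=counts.get)
-- ===== Notes on version B (the rewrite author's own statement) =====
-- stated objective: alternative
-- what changed: B drops A's set-of-tuples entirely: an early-exit any() compares each row directly to the first row, and only in the all-equal case builds a counts dict and takes max(counts, key=counts.get) instead of A's fused dict+set loop followed by an items scan that recomputes max(values) per item.
-- outside the precondition, e.g. on data_duplicate_checker([]): A returns None, B raises IndexError
import Mathlib
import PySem

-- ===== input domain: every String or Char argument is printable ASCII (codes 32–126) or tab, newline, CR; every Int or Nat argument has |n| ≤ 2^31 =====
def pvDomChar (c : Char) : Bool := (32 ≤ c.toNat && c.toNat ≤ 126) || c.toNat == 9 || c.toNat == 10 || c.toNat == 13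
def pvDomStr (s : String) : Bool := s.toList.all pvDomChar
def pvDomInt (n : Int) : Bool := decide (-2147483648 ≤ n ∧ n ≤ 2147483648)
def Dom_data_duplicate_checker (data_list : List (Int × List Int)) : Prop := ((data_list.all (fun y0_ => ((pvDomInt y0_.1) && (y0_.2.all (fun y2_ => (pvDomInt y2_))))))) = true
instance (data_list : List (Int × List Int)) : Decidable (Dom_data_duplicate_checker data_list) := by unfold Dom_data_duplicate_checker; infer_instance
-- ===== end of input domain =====

-- B drops A's set-of-tuples: an early-exit comparison of every row against the first row, then (only if all
-- rows equal) a counts dict and max(counts, key=counts.get) instead of A's fused loop + items scan (objective: alternative).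

-- ===== PORT A =====
-- 'for k, v in label_count_dict.items(): if v == max(label_count_dict.values()): selected_label = k; break'
def ddcSelLoop (vals : List Int) : List (Int × Int) → Option Int
  | [] => none
  | (k, v) :: rest =>
      if some v == PySem.List.max? vals (fun x => x) then some k else ddcSelLoop vals rest

def data_duplicate_checker (data_list : List (Int × List Int)) : Bool × Option Int :=
  let st := data_list.foldl
    (fun (st : PySem.Dict Int Int × PySem.Set (List Int)) d =>
      (if st.1.contains d.1 then st.1.modify d.1 0 (· + 1) else st.1.insert d.1 1,
       if st.2.contains d.2 then st.2 else st.2.add d.2))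
    (PySem.Dict.empty, PySem.Set.empty)
  if st.2.length = 1 then
    (false, ddcSelLoop st.1.values st.1.items)
  else if 1 < st.2.length then (true, none)
  else (false, none)  -- data_list = []: the Python falls off the end (returns None, not a pair); excluded by Pre_

-- ===== PORT B =====
def data_duplicate_checker_alt (data_list : List (Int × List Int)) : Bool × Option Int :=
  match data_list with
  | [] => (false, none)  -- data_list[0] raises IndexError in Python B; excluded by Pre_
  | d0 :: _ =>
    if data_list.any (fun d => d.2 != d0.2) then (true, none)
    else
      let counts := data_list.foldl
        (fun (c : PySem.Dict Int Int) d => c.insert d.1 (c.getD d.1 0 + 1)) PySem.Dict.empty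
      (false, PySem.List.max? counts.keys (fun k => counts.getD k 0))

-- ===== PRECONDITION & SPEC =====
-- On [] the Python A returns the bare None instead of a (bool, Optional[int]) pair (and B raises IndexError), so [] is excluded.
def Pre_data_duplicate_checker (data_list : List (Int × List Int)) : Prop := data_list ≠ []
instance (data_list : List (Int × List Int)) : Decidable (Pre_data_duplicate_checker data_list) := by unfold Pre_data_duplicate_checker; infer_instance
def pvWitness_data_duplicate_checker : (List (Int × List Int)) := ([(1, [0, 2]), (2, [0, 2])])

def Spec_data_duplicate_checker (data_list : List (Int × List Int)) (out : Bool × Option Int) : Prop := out = data_duplicate_checker_alt data_list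
instance (data_list : List (Int × List Int)) (out : Bool × Option Int) : Decidable (Spec_data_duplicate_checker data_list out) := by unfold Spec_data_duplicate_checker; infer_instance

-- ===== CLAIM (what is proved, stated in full; the proofs are below) =====
def Claim_equal_data_duplicate_checker : Prop := ∀ (data_list : List (Int × List Int)), Dom_data_duplicate_checker data_list → Pre_data_duplicate_checker data_list → Spec_data_duplicate_checker data_list (data_duplicate_checker data_list)

-- ===== LEMMAS AND PROOFS =====

-- the step of PySem.List.max? (first-extremal running max)
def ddcStep {α : Type} (f : α → Int) : Option α → α → Option α :=
  fun acc x =>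
    match acc with
    | none => some x
    | some m => if f m < f x then some x else some m

lemma ddc_max?_eq_foldl {α : Type} (f : α → Int) (xs : List α) :
    PySem.List.max? xs f = xs.foldl (ddcStep f) none := rfl

lemma ddc_fold_keep {α : Type} (f : α → Int) (t : List α) (m : α)
    (h : ∀ y ∈ t, f y ≤ f m) : t.foldl (ddcStep f) (some m) = some m := by
  induction t with
  | nil => rfl
  | cons x t ih =>
      have hx : ¬ f m < f x := not_lt.mpr (h x (by simp))
      simpa [ddcStep, hx] using ih (fun y hy => h y (by simp [hy]))

lemma ddc_fold_find {α : Type} (f : α → Int) (M : Int) :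
    ∀ ks : List α, (∃ y ∈ ks, f y = M) → (∀ y ∈ ks, f y ≤ M) →
      (∀ a : α, f a < M → ks.foldl (ddcStep f) (some a) = ks.find? (fun k => f k == M)) ∧
      ks.foldl (ddcStep f) none = ks.find? (fun k => f k == M) := by
  intro ks
  induction ks with
  | nil => rintro ⟨y, hy, _⟩ _; exact absurd hy (by simp)
  | cons x t ih =>
      intro hex hub
      by_cases hx : f x = M
      · have ht : ∀ y ∈ t, f y ≤ f x := fun y hy => hx ▸ hub y (by simp [hy])
        have hfind : (x :: t).find? (fun k => f k == M) = some x := by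
          simp [List.find?, hx]
        constructor
        · intro a ha
          have : ddcStep f (some a) x = some x := by
            simp [ddcStep, hx ▸ ha]
          simp only [List.foldl_cons, this, hfind]
          exact ddc_fold_keep f t x ht
        · simp only [List.foldl_cons, hfind]
          have : ddcStep f none x = some x := rfl
          rw [this]
          exact ddc_fold_keep f t x ht
      · have hxlt : f x < M := lt_of_le_of_ne (hub x (by simp)) hx
        have hex' : ∃ y ∈ t, f y = M := by
          rcases hex with ⟨y, hy, hyM⟩
          rcases List.mem_cons.mp hy with rfl | hy'
          · exact absurd hyM hx
          · exact ⟨y, hy', hyM⟩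
        have hub' : ∀ y ∈ t, f y ≤ M := fun y hy => hub y (by simp [hy])
        have IH := ih hex' hub'
        have hfx : (f x == M) = false := by simpa using hx
        have hfind : (x :: t).find? (fun k => f k == M) = t.find? (fun k => f k == M) := by
          simp [List.find?, hfx]
        constructor
        · intro a ha
          simp only [List.foldl_cons, hfind]
          by_cases hax : f a < f x
          · simpa [ddcStep, hax] using IH.1 x hxlt
          · simpa [ddcStep, hax] using IH.1 a ha
        · simp only [List.foldl_cons, hfind]
          have : ddcStep f none x = some x := rfl
          rw [this]
          exact IH.1 x hxlt

lemma ddc_selLoop_eq_find (f : Int → Int) (vals : List Int) (M : Int)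
    (hM : PySem.List.max? vals (fun x => x) = some M) :
    ∀ ks : List Int, ddcSelLoop vals (ks.map (fun k => (k, f k))) = ks.find? (fun k => f k == M) := by
  intro ks
  induction ks with
  | nil => rfl
  | cons x t ih =>
      simp only [List.map_cons, ddcSelLoop, hM, List.find?]
      by_cases hx : f x = M
      · simp [hx]
      · have hfx : (f x == M) = false := by simpa using hx
        simp [hfx, ih]

-- first key of ks whose f-value equals the max of ks.map f  =  max? ks f
lemma ddc_sel_eq_max (f : Int → Int) (ks : List Int) (hne : ks ≠ []) :
    ddcSelLoop (ks.map f) (ks.map (fun k => (k, f k))) = PySem.List.max? ks f := by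
  obtain ⟨M, hM⟩ : ∃ M, PySem.List.max? (ks.map f) (fun x => x) = some M := by
    cases h : PySem.List.max? (ks.map f) (fun x => x) with
    | none =>
        exact absurd (List.map_eq_nil_iff.mp ((PySem.List.max?_eq_none_iff (ks.map f) (fun x => x)).mp h)) hne
    | some m => exact ⟨m, rfl⟩
  have hmem : M ∈ ks.map f := PySem.List.max?_mem hM
  have hub : ∀ v ∈ ks.map f, v ≤ M := fun v hv => PySem.List.max?_isMax hM v hv
  have hex : ∃ y ∈ ks, f y = M := by simpa using hmem
  have hub' : ∀ y ∈ ks, f y ≤ M := fun y hy => hub (f y) (List.mem_map_of_mem hy)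
  rw [ddc_selLoop_eq_find f (ks.map f) M hM ks, ddc_max?_eq_foldl]
  exact ((ddc_fold_find f M ks hex hub').2).symm

-- A's fused loop splits into the counter of the labels and the set of the rows
lemma ddc_fold_split (data_list : List (Int × List Int)) :
    data_list.foldl
      (fun (st : PySem.Dict Int Int × PySem.Set (List Int)) d =>
        (if st.1.contains d.1 then st.1.modify d.1 0 (· + 1) else st.1.insert d.1 1,
         if st.2.contains d.2 then st.2 else st.2.add d.2))
      (PySem.Dict.empty, PySem.Set.empty)
    = (PySem.Dict.counter (data_list.map (·.1)), PySem.Set.ofList (data_list.map (·.2))) := by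
  rw [PySem.List.foldl_prod_mk
        (f := fun (d : PySem.Dict Int Int) (e : Int × List Int) =>
          if d.contains e.1 then d.modify e.1 0 (· + 1) else d.insert e.1 1)
        (g := fun (s : PySem.Set (List Int)) (e : Int × List Int) =>
          if s.contains e.2 then s else s.add e.2)]
  congr 1
  · rw [PySem.Dict.counter, List.foldl_map]
    apply PySem.List.foldl_congr_mem
    intro d e _
    by_cases h : d.contains e.1
    · simp [h]
    · have h0 : d.getD e.1 0 = 0 := PySem.Dict.getD_of_not_contains d 0 (by simpa using h)
      simp [h, PySem.Dict.modify, h0]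
  · rw [PySem.Set.ofList, List.foldl_map]
    apply PySem.List.foldl_congr_mem
    intro s e _
    by_cases h : PySem.Set.contains s e.2
    · have hm : e.2 ∈ s := by simpa [PySem.Set.contains_eq_listContains] using h
      rw [if_pos h, PySem.Set.add_of_mem hm]
    · rw [if_neg h]

-- folding Set.add over elements all equal to x leaves [x] unchanged
lemma ddc_set_fold_const (x : List Int) :
    ∀ xs : List (List Int), (∀ y ∈ xs, y = x) → xs.foldl PySem.Set.add [x] = [x] := by
  intro xs
  induction xs with
  | nil => intro _; rfl
  | cons a t ih =>
      intro h
      have ha : a = x := h a (by simp)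
      have : PySem.Set.add [x] a = [x] := by
        subst ha; simp [PySem.Set.add]
      simpa [this] using ih (fun y hy => h y (by simp [hy]))

-- a list with two distinct members has length > 1
lemma ddc_one_lt_length {α : Type} (s : List α) (x y : α) (hx : x ∈ s) (hy : y ∈ s)
    (hne : x ≠ y) : 1 < s.length := by
  match s with
  | [] => simp at hx
  | [a] =>
      simp at hx hy
      exact absurd (hx.trans hy.symm) hne
  | a :: b :: t => simp

-- ===== VERDICT (by name: the statement is the Claim_ definition above) =====
theorem data_duplicate_checker_spec : Claim_equal_data_duplicate_checker := by
  intro data_list _ hpre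
  unfold Spec_data_duplicate_checker data_duplicate_checker data_duplicate_checker_alt
  rw [ddc_fold_split]
  match data_list, hpre with
  | d0 :: rest, _ =>
  simp only [List.map_cons]
  by_cases hany : (d0 :: rest).any (fun d => d.2 != d0.2) = true
  · -- some row differs from the first row: the set has > 1 elements
    obtain ⟨e, he, hene⟩ := List.any_eq_true.mp hany
    have hene' : e.2 ≠ d0.2 := by simpa using hene
    have h1 : d0.2 ∈ PySem.Set.ofList (d0.2 :: rest.map (·.2)) :=
      (PySem.Set.mem_ofList _ _).mpr (by simp)
    have h2 : e.2 ∈ PySem.Set.ofList (d0.2 :: rest.map (·.2)) := by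
      refine (PySem.Set.mem_ofList _ _).mpr ?_
      rcases List.mem_cons.mp he with rfl | he'
      · simp
      · exact List.mem_cons_of_mem _ (List.mem_map_of_mem he')
    have hlt : 1 < (PySem.Set.ofList (d0.2 :: rest.map (·.2))).length :=
      ddc_one_lt_length _ _ _ h2 h1 hene'
    rw [if_neg (by omega), if_pos hlt, if_pos hany]
  · -- all rows equal the first row: the set is exactly [d0.2]
    have hall : ∀ d ∈ d0 :: rest, d.2 = d0.2 := by
      intro d hd
      by_contra hne
      exact hany (List.any_eq_true.mpr ⟨d, hd, by simpa using hne⟩)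
    have hset : PySem.Set.ofList (d0.2 :: rest.map (·.2)) = [d0.2] := by
      rw [PySem.Set.ofList]
      simp only [List.foldl_cons]
      have h0 : PySem.Set.add PySem.Set.empty d0.2 = [d0.2] := rfl
      rw [h0]
      exact ddc_set_fold_const d0.2 _
        (by intro y hy; obtain ⟨d, hd, rfl⟩ := List.mem_map.mp hy; exact hall d (by simp [hd]))
    simp only [hset, List.length_singleton]
    rw [if_pos trivial, if_neg hany]
    -- both selections equal max? over the deduped labels keyed by count
    have hcounts : (d0 :: rest).foldl
        (fun (c : PySem.Dict Int Int) d => c.insert d.1 (c.getD d.1 0 + 1)) PySem.Dict.empty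
        = PySem.Dict.counter ((d0 :: rest).map (·.1)) := by
      rw [← PySem.Dict.foldl_insert_getD_add_one_eq_counter, List.foldl_map]
    have hlabels : (d0 :: rest).map (·.1) = d0.1 :: rest.map (·.1) := List.map_cons ..
    rw [hcounts, hlabels]
    set labels := d0.1 :: rest.map (·.1) with hlab
    have hgetD : (fun k => (PySem.Dict.counter labels).getD k 0)
        = fun k => (labels.count k : Int) := by
      funext k; exact PySem.Dict.getD_counter labels k
    have hksne : PySem.Set.ofList labels ≠ [] := by
      rw [hlab, PySem.Set.ofList_cons]; simp
    have hitems := PySem.Dict.items_counter labels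
    have hvals : (PySem.Dict.counter labels).values
        = (PySem.Set.ofList labels).map (fun k => (labels.count k : Int)) := by
      simp [PySem.Dict.values, hitems]
    rw [PySem.Dict.keys_counter labels, hgetD, hitems, hvals,
        ddc_sel_eq_max (fun l => (labels.count l : Int)) (PySem.Set.ofList labels) hksne]
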